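-- pv_equiv track=rewrite | github.com/MINASAMIRHANNA/Mina_Bot | bot_learning_audit.py | summarize_outcomes
-- ===== SOURCE A (Python) =====
-- from typing import Any, Dict, List, Optional, Tuple
--
-- def summarize_outcomes(rows: List[Dict[str, Any]], outcome_col: str) -> Dict[str, int]:
--     counts = {"WIN": 0, "LOSS": 0, "BREAKEVEN": 0, "PENDING": 0}
--     for r in rows:
--         v = (r.get(outcome_col) or "").strip().upper()
--         if v in counts:
--             counts[v] += 1
--         else:
--             counts["PENDING"] += 1
--     return counts
-- ===== SOURCE B (Python) =====
-- from typing import Any, Dict, List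
--
-- def summarize_outcomes(rows: List[Dict[str, Any]], outcome_col: str) -> Dict[str, int]:
--     def norm(r):
--         return (r.get(outcome_col) or "").strip().upper()
--     win = sum(1 for r in rows if norm(r) == "WIN")
--     loss = sum(1 for r in rows if norm(r) == "LOSS")
--     breakeven = sum(1 for r in rows if norm(r) == "BREAKEVEN")
--     return {
--         "WIN": win,
--         "LOSS": loss,
--         "BREAKEVEN": breakeven,
--         "PENDING": len(rows) - win - loss - breakeven,
--     }
-- ===== Notes on version B (the rewrite author's own statement) =====
-- stated objective: alternative
-- what changed: Replaces A's single stateful branch-per-row loop over a counts dict with three independent category-count scans and derives PENDING arithmetically as len(rows) minus the three named counts.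
import Mathlib
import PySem

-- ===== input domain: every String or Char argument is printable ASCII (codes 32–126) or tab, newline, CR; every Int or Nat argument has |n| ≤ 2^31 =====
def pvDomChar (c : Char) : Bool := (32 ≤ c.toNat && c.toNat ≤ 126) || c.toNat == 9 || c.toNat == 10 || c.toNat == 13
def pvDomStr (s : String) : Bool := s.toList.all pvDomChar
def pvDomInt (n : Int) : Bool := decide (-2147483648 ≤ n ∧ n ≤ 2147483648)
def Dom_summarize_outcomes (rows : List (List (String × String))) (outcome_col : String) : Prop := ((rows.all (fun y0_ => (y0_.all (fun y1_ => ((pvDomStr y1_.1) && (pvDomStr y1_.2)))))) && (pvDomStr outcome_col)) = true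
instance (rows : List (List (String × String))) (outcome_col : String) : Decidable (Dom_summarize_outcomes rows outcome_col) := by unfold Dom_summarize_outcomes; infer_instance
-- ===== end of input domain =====

-- B computes the three named category counts by independent scans and derives PENDING
-- by subtraction, instead of A's single branch-per-row loop over a mutable counts dict.

-- shared normalization: (r.get(outcome_col) or "").strip().upper()
def pvNorm (r : List (String × String)) (outcome_col : String) : String :=
  PySem.Str.upper (PySem.Str.strip (((PySem.Dict.mk r).get? outcome_col).getD ""))

-- ===== PORT A =====
def summarize_outcomes (rows : List (List (String × String))) (outcome_col : String) : List (String × Int) :=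
  let counts : PySem.Dict String Int :=
    PySem.Dict.mk [("WIN", 0), ("LOSS", 0), ("BREAKEVEN", 0), ("PENDING", 0)]
  let counts := rows.foldl (fun counts r =>
    let v := pvNorm r outcome_col
    if counts.contains v then counts.modify v 0 (· + 1)
    else counts.modify "PENDING" 0 (· + 1)) counts
  counts.items

-- ===== PORT B =====
def summarize_outcomes_alt (rows : List (List (String × String))) (outcome_col : String) : List (String × Int) :=
  let win : Int := rows.countP (fun r => pvNorm r outcome_col == "WIN")
  let loss : Int := rows.countP (fun r => pvNorm r outcome_col == "LOSS")
  let breakeven : Int := rows.countP (fun r => pvNorm r outcome_col == "BREAKEVEN")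
  [("WIN", win), ("LOSS", loss), ("BREAKEVEN", breakeven),
   ("PENDING", (rows.length : Int) - win - loss - breakeven)]

-- ===== PRECONDITION & SPEC =====
def Spec_summarize_outcomes (rows : List (List (String × String))) (outcome_col : String) (out : List (String × Int)) : Prop := out = summarize_outcomes_alt rows outcome_col
instance (rows : List (List (String × String))) (outcome_col : String) (out : List (String × Int)) : Decidable (Spec_summarize_outcomes rows outcome_col out) := by unfold Spec_summarize_outcomes; infer_instance

-- ===== CLAIM (what is proved, stated in full; the proofs are below) =====
def Claim_equal_summarize_outcomes : Prop := ∀ (rows : List (List (String × String))) (outcome_col : String), Dom_summarize_outcomes rows outcome_col → Spec_summarize_outcomes rows outcome_col (summarize_outcomes rows outcome_col)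

-- ===== LEMMAS AND PROOFS =====

-- ===== VERDICT (by name: the statement is the Claim_ definition above) =====
-- one step of A's loop on the invariant four-key dict
lemma pv_step (v : String) (w l b p : Int) :
    (if (PySem.Dict.mk [("WIN", w), ("LOSS", l), ("BREAKEVEN", b), ("PENDING", p)]).contains v
     then (PySem.Dict.mk [("WIN", w), ("LOSS", l), ("BREAKEVEN", b), ("PENDING", p)]).modify v 0 (· + 1)
     else (PySem.Dict.mk [("WIN", w), ("LOSS", l), ("BREAKEVEN", b), ("PENDING", p)]).modify "PENDING" 0 (· + 1))
    = PySem.Dict.mk [("WIN", if v = "WIN" then w + 1 else w),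
                     ("LOSS", if v = "LOSS" then l + 1 else l),
                     ("BREAKEVEN", if v = "BREAKEVEN" then b + 1 else b),
                     ("PENDING", if v = "WIN" ∨ v = "LOSS" ∨ v = "BREAKEVEN" then p else p + 1)] := by
  by_cases hw : v = "WIN"
  · subst hw
    simp [PySem.Dict.contains, PySem.Dict.modify, PySem.Dict.insert, PySem.Dict.getD, PySem.Dict.get?]
  by_cases hl : v = "LOSS"
  · subst hl
    simp [PySem.Dict.contains, PySem.Dict.modify, PySem.Dict.insert, PySem.Dict.getD, PySem.Dict.get?]
  by_cases hb : v = "BREAKEVEN"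
  · subst hb
    simp [PySem.Dict.contains, PySem.Dict.modify, PySem.Dict.insert, PySem.Dict.getD, PySem.Dict.get?]
  by_cases hp : v = "PENDING"
  · subst hp
    simp [PySem.Dict.contains, PySem.Dict.modify, PySem.Dict.insert, PySem.Dict.getD, PySem.Dict.get?]
  · have hw' : ("WIN" == v) = false := by simpa using fun h => hw h.symm
    have hl' : ("LOSS" == v) = false := by simpa using fun h => hl h.symm
    have hb' : ("BREAKEVEN" == v) = false := by simpa using fun h => hb h.symm
    have hp' : ("PENDING" == v) = false := by simpa using fun h => hp h.symm
    simp [PySem.Dict.contains, PySem.Dict.modify, PySem.Dict.insert, PySem.Dict.getD,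
          PySem.Dict.get?, hw, hl, hb, hw', hl', hb', hp']

-- loop invariant: the fold keeps the four-key dict, adding B's per-category counts
lemma pv_loop (outcome_col : String) :
    ∀ (rows : List (List (String × String))) (w l b p : Int),
    (rows.foldl (fun counts r =>
        let v := pvNorm r outcome_col
        if counts.contains v then counts.modify v 0 (· + 1)
        else counts.modify "PENDING" 0 (· + 1))
      (PySem.Dict.mk [("WIN", w), ("LOSS", l), ("BREAKEVEN", b), ("PENDING", p)])).items
    = [("WIN", w + rows.countP (fun r => pvNorm r outcome_col == "WIN")),
       ("LOSS", l + rows.countP (fun r => pvNorm r outcome_col == "LOSS")),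
       ("BREAKEVEN", b + rows.countP (fun r => pvNorm r outcome_col == "BREAKEVEN")),
       ("PENDING", p + ((rows.length : Int)
          - rows.countP (fun r => pvNorm r outcome_col == "WIN")
          - rows.countP (fun r => pvNorm r outcome_col == "LOSS")
          - rows.countP (fun r => pvNorm r outcome_col == "BREAKEVEN")))] := by
  intro rows
  induction rows with
  | nil => intro w l b p; simp
  | cons r rest ih =>
    intro w l b p
    simp only [List.foldl_cons, List.countP_cons, List.length_cons]
    rw [pv_step (pvNorm r outcome_col), ih]
    by_cases hw : pvNorm r outcome_col = "WIN" <;>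
      by_cases hl : pvNorm r outcome_col = "LOSS" <;>
        by_cases hb : pvNorm r outcome_col = "BREAKEVEN" <;>
          simp [hw, hl, hb] <;> omega

theorem summarize_outcomes_spec : Claim_equal_summarize_outcomes := by
  intro rows outcome_col _
  unfold Spec_summarize_outcomes summarize_outcomes summarize_outcomes_alt
  rw [pv_loop]
  simp
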